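-- pv_equiv track=rewrite | github.com/reggiechan74/cc-plugins | math-paper-creator/src/meta_compiler/units.py | _cancel
-- ===== SOURCE A (Python) =====
-- def _cancel(numer: list[str], denom: list[str]) -> tuple[tuple[str, ...], tuple[str, ...]]:
--     """Cancel matching terms between numerator and denominator."""
--     n = list(numer)
--     d = list(denom)
--     for term in list(n):
--         if term in d:
--             n.remove(term)
--             d.remove(term)
--     return tuple(sorted(n)), tuple(sorted(d))
-- ===== SOURCE B (Python) =====
-- def _cancel(numer: list[str], denom: list[str]) -> tuple[tuple[str, ...], tuple[str, ...]]:
--     """Cancel matching terms between numerator and denominator.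
--
--     Sort both sides once, then a single two-pointer merge performs the
--     multiset cancellation and yields both results already sorted.
--     """
--     ns = sorted(numer)
--     ds = sorted(denom)
--     rn: list[str] = []
--     rd: list[str] = []
--     i = j = 0
--     while i < len(ns) and j < len(ds):
--         if ns[i] == ds[j]:
--             i += 1
--             j += 1
--         elif ns[i] < ds[j]:
--             rn.append(ns[i])
--             i += 1
--         else:
--             rd.append(ds[j])
--             j += 1
--     rn.extend(ns[i:])
--     rd.extend(ds[j:])
--     return tuple(rn), tuple(rd)
-- ===== Notes on version B (the rewrite author's own statement) =====
-- stated objective: faster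
-- what changed: Replaces the repeated in/remove list scans (quadratic multiset difference) by sorting both lists once and cancelling with a single linear two-pointer merge that emits both already-sorted results.
import Mathlib
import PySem

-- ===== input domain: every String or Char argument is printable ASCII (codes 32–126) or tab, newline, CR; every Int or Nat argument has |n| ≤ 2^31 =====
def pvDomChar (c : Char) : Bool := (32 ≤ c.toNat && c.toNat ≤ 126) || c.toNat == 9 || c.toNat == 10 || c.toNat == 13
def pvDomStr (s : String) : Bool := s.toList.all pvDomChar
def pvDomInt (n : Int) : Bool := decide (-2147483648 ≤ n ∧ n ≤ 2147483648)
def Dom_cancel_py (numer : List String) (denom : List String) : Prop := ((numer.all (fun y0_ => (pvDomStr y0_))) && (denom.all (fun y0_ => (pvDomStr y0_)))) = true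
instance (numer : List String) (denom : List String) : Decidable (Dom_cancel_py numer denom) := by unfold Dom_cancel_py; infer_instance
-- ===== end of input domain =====

-- B replaces A's repeated in/remove scans by sorting both lists once and cancelling with a single two-pointer merge; proved to return A's exact value on all inputs.


-- ===== PORT A =====
-- one iteration of A's loop body: 'if term in d: n.remove(term); d.remove(term)'
-- (n.remove never raises: every processed term comes from the original numer snapshot and at most
--  that many earlier copies of it have been removed from n, so the .getD fallback is unreachable)
def cancelStep (st : List String × List String) (term : String) : List String × List String :=
  if st.2.contains term then
    ((PySem.List.remove? st.1 term).getD st.1, (PySem.List.remove? st.2 term).getD st.2)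
  else st

def cancel_py (numer : List String) (denom : List String) : List String × List String :=
  -- n = list(numer); d = list(denom); for term in list(n): …   (list(n) is the original numer)
  let st := numer.foldl cancelStep (numer, denom)
  (PySem.List.sorted st.1 (fun x => x) false, PySem.List.sorted st.2 (fun x => x) false)

-- ===== PORT B =====
-- the two-pointer merge loop of Source B (the index pair becomes structural recursion on the two
-- sorted lists; the final rn.extend(ns[i:]) / rd.extend(ds[j:]) flushes are the base cases)
def mergeCancel : List String → List String → List String × List String
  | [], ds => ([], ds)
  | n :: ns, [] => (n :: ns, [])
  | x :: xs, y :: ys =>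
    if x = y then mergeCancel xs ys
    else if x < y then
      let r := mergeCancel xs (y :: ys)
      (x :: r.1, r.2)
    else
      let r := mergeCancel (x :: xs) ys
      (r.1, y :: r.2)

def cancel_py_alt (numer : List String) (denom : List String) : List String × List String :=
  mergeCancel (PySem.List.sorted numer (fun x => x) false) (PySem.List.sorted denom (fun x => x) false)

-- ===== PRECONDITION & SPEC =====
def Spec_cancel_py (numer : List String) (denom : List String) (out : List String × List String) : Prop := out = cancel_py_alt numer denom
instance (numer : List String) (denom : List String) (out : List String × List String) : Decidable (Spec_cancel_py numer denom out) := by unfold Spec_cancel_py; infer_instance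

-- ===== CLAIM (what is proved, stated in full; the proofs are below) =====
def Claim_equal_cancel_py : Prop := ∀ (numer : List String) (denom : List String), Dom_cancel_py numer denom → Spec_cancel_py numer denom (cancel_py numer denom)

-- ===== LEMMAS AND PROOFS =====

-- A's loop computes the multiset differences: folding cancelStep over a snapshot ts that is a
-- sub-multiset of n (A's snapshot is n itself) removes ts ∩ d from both sides.
theorem cancelStep_foldl (ts : List String) : ∀ (n d : List String),
    (ts : Multiset String) ≤ (n : Multiset String) →
    ((ts.foldl cancelStep (n, d)).1 : Multiset String)
        = (n : Multiset String) - ((ts : Multiset String) ∩ (d : Multiset String)) ∧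
    ((ts.foldl cancelStep (n, d)).2 : Multiset String)
        = (d : Multiset String) - ((ts : Multiset String) ∩ (d : Multiset String)) := by
  induction ts with
  | nil => intro n d h; simp
  | cons t rest ih =>
    intro n d h
    have htn : t ∈ n := by
      have : t ∈ ((t :: rest : List String) : Multiset String) := by simp
      simpa using Multiset.mem_of_le h this
    simp only [List.foldl_cons]
    by_cases hd : t ∈ d
    · have hstep : cancelStep (n, d) t = (n.erase t, d.erase t) := by
        simp [cancelStep, hd, PySem.List.remove?_eq_some_erase _ _ htn,
          PySem.List.remove?_eq_some_erase _ _ hd]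
      rw [hstep]
      have hle : ((rest : List String) : Multiset String) ≤ ((n.erase t : List String) : Multiset String) := by
        rw [Multiset.le_iff_count] at h ⊢
        intro a
        have := h a
        simp only [Multiset.coe_count, List.count_cons, List.count_erase] at *
        (split_ifs at * <;> simp_all); omega
      obtain ⟨h1, h2⟩ := ih (n.erase t) (d.erase t) hle
      have hdc : 1 ≤ d.count t := List.one_le_count_iff.mpr hd
      constructor
      · rw [h1]; ext a
        simp only [Multiset.count_sub, Multiset.count_inter, Multiset.coe_count,
          List.count_cons, List.count_erase]
        split_ifs <;> simp only [beq_iff_eq] at * <;> subst_vars <;> omega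
      · rw [h2]; ext a
        simp only [Multiset.count_sub, Multiset.count_inter, Multiset.coe_count,
          List.count_cons, List.count_erase]
        split_ifs <;> simp only [beq_iff_eq] at * <;> subst_vars <;> omega
    · have hstep : cancelStep (n, d) t = (n, d) := by simp [cancelStep, hd]
      rw [hstep]
      have hle : ((rest : List String) : Multiset String) ≤ (n : Multiset String) := by
        rw [Multiset.le_iff_count] at h ⊢
        intro a; have := h a
        simp only [Multiset.coe_count, List.count_cons] at *
        split_ifs at * <;> omega
      obtain ⟨h1, h2⟩ := ih n d hle
      have hdc : d.count t = 0 := List.count_eq_zero.mpr hd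
      constructor
      · rw [h1]; ext a
        simp only [Multiset.count_sub, Multiset.count_inter, Multiset.coe_count, List.count_cons]
        split_ifs <;> simp only [beq_iff_eq] at * <;> subst_vars <;> omega
      · rw [h2]; ext a
        simp only [Multiset.count_sub, Multiset.count_inter, Multiset.coe_count, List.count_cons]
        split_ifs <;> simp only [beq_iff_eq] at * <;> subst_vars <;> omega

theorem msub_cons_cons (s t : Multiset String) (a : String) : (a ::ₘ s) - (a ::ₘ t) = s - t := by
  ext b; simp only [Multiset.count_sub, Multiset.count_cons]; omega

theorem msub_cons_left (s t : Multiset String) (a : String) (h : t.count a = 0) :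
    (a ::ₘ s) - t = a ::ₘ (s - t) := by
  ext b; simp only [Multiset.count_sub, Multiset.count_cons]
  by_cases hb : b = a <;> simp [hb, h]

theorem msub_cons_right (s t : Multiset String) (a : String) (h : t.count a = 0) :
    t - (a ::ₘ s) = t - s := by
  ext b; simp only [Multiset.count_sub, Multiset.count_cons]
  by_cases hb : b = a <;> simp [hb, h]

theorem msub_inter_self (s t : Multiset String) : s - (s ∩ t) = s - t := by
  ext a; simp only [Multiset.count_sub, Multiset.count_inter]; omega

-- an element smaller than the head of a sorted list occurs nowhere in it
theorem not_mem_of_lt_head (x y : String) (ys : List String) (hlt : x < y)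
    (hd : List.Pairwise (fun a b => a ≤ b) (y :: ys)) :
    Multiset.count x ((y :: ys : List String) : Multiset String) = 0 := by
  simp only [Multiset.coe_count, List.count_eq_zero]
  intro hmem
  rcases List.mem_cons.mp hmem with rfl | hm
  · exact absurd hlt (lt_irrefl x)
  · exact absurd (lt_of_lt_of_le hlt ((List.pairwise_cons.mp hd).1 x hm)) (lt_irrefl x)

-- B's merge on sorted inputs: both components are the multiset differences, and both are sorted.
theorem mergeCancel_spec : ∀ (ns ds : List String),
    ns.Pairwise (· ≤ ·) → ds.Pairwise (· ≤ ·) →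
    ((mergeCancel ns ds).1 : Multiset String) = (ns : Multiset String) - (ds : Multiset String) ∧
    ((mergeCancel ns ds).2 : Multiset String) = (ds : Multiset String) - (ns : Multiset String) ∧
    (mergeCancel ns ds).1.Pairwise (· ≤ ·) ∧ (mergeCancel ns ds).2.Pairwise (· ≤ ·) := by
  intro ns ds
  induction ns, ds using mergeCancel.induct with
  | case1 ds =>
    intro _ hd
    simp only [mergeCancel]
    exact ⟨by simp, by simp, by simp, hd⟩
  | case2 n ns =>
    intro hn _
    simp only [mergeCancel]
    exact ⟨by simp, by simp, hn, by simp⟩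
  | case3 xs y ys ih =>
    intro hn hd
    obtain ⟨h1, h2, h3, h4⟩ := ih (List.Pairwise.of_cons hn) (List.Pairwise.of_cons hd)
    rw [mergeCancel]; simp only [if_pos]
    rw [← Multiset.cons_coe, ← Multiset.cons_coe, msub_cons_cons, msub_cons_cons]
    exact ⟨h1, h2, h3, h4⟩
  | case4 x xs y ys hne hlt ih =>
    intro hn hd
    obtain ⟨h1, h2, h3, h4⟩ := ih (List.Pairwise.of_cons hn) hd
    rw [mergeCancel]; simp only [if_neg hne, if_pos hlt]
    have hxd := not_mem_of_lt_head x y ys hlt hd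
    refine ⟨?_, ?_, ?_, h4⟩
    · rw [← Multiset.cons_coe (l := xs), ← Multiset.cons_coe, msub_cons_left _ _ _ hxd, h1]
    · rw [← Multiset.cons_coe (l := xs), msub_cons_right _ _ _ hxd, h2]
    · rw [List.pairwise_cons]
      refine ⟨?_, h3⟩
      intro z hz
      have hz' : z ∈ ((mergeCancel xs (y :: ys)).1 : Multiset String) := by simpa using hz
      rw [h1] at hz'
      have : z ∈ (xs : Multiset String) := Multiset.mem_of_le (Multiset.sub_le_self _ _) hz'
      exact (List.pairwise_cons.mp hn).1 z (by simpa using this)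
  | case5 x xs y ys hne hnlt ih =>
    intro hn hd
    have hlt : y < x := by
      rcases lt_trichotomy x y with h | h | h
      · exact absurd h hnlt
      · exact absurd h hne
      · exact h
    obtain ⟨h1, h2, h3, h4⟩ := ih hn (List.Pairwise.of_cons hd)
    rw [mergeCancel]; simp only [if_neg hne, if_neg hnlt]
    have hyd := not_mem_of_lt_head y x xs hlt hn
    refine ⟨?_, ?_, h3, ?_⟩
    · rw [← Multiset.cons_coe (l := ys), msub_cons_right _ _ _ hyd, h1]
    · rw [← Multiset.cons_coe (l := ys), ← Multiset.cons_coe, msub_cons_left _ _ _ hyd, h2]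
    · rw [List.pairwise_cons]
      refine ⟨?_, h4⟩
      intro z hz
      have hz' : z ∈ ((mergeCancel (x :: xs) ys).2 : Multiset String) := by simpa using hz
      rw [h2] at hz'
      have : z ∈ (ys : Multiset String) := Multiset.mem_of_le (Multiset.sub_le_self _ _) hz'
      exact (List.pairwise_cons.mp hd).1 z (by simpa using this)

-- ===== VERDICT (by name: the statement is the Claim_ definition above) =====
theorem cancel_py_spec : Claim_equal_cancel_py := by
  unfold Claim_equal_cancel_py
  intro numer denom _
  unfold Spec_cancel_py cancel_py cancel_py_alt
  obtain ⟨ha1, ha2⟩ := cancelStep_foldl numer numer denom le_rfl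
  rw [msub_inter_self] at ha1
  have ha2' : ((numer.foldl cancelStep (numer, denom)).2 : Multiset String)
      = (denom : Multiset String) - (numer : Multiset String) := by
    rw [ha2]; ext a
    simp only [Multiset.count_sub, Multiset.count_inter]; omega
  have hns : ((PySem.List.sorted numer (fun x => x) false : List String) : Multiset String)
      = (numer : Multiset String) := Multiset.coe_eq_coe.mpr (PySem.List.sorted_perm numer (fun x => x) false)
  have hds : ((PySem.List.sorted denom (fun x => x) false : List String) : Multiset String)
      = (denom : Multiset String) := Multiset.coe_eq_coe.mpr (PySem.List.sorted_perm denom (fun x => x) false)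
  obtain ⟨hb1, hb2, hb3, hb4⟩ := mergeCancel_spec _ _
    (PySem.List.sorted_pairwise numer (fun x => x)) (PySem.List.sorted_pairwise denom (fun x => x))
  rw [hns, hds] at hb1 hb2
  have hp1 : (mergeCancel (PySem.List.sorted numer (fun x => x) false)
      (PySem.List.sorted denom (fun x => x) false)).1.Perm (numer.foldl cancelStep (numer, denom)).1 :=
    Multiset.coe_eq_coe.mp (hb1.trans ha1.symm)
  have hp2 : (mergeCancel (PySem.List.sorted numer (fun x => x) false)
      (PySem.List.sorted denom (fun x => x) false)).2.Perm (numer.foldl cancelStep (numer, denom)).2 :=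
    Multiset.coe_eq_coe.mp (hb2.trans ha2'.symm)
  exact Prod.ext
    (PySem.List.sorted_id_eq_of_perm_of_pairwise _ _ hp1 hb3)
    (PySem.List.sorted_id_eq_of_perm_of_pairwise _ _ hp2 hb4)
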